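-- pv_equiv track=rewrite | github.com/liskos/larchen | variant_07/22.py | f
-- ===== SOURCE A (Python) =====
-- def f(x):
--     a = 0
--     b = 1
--     while x > 0:
--         a = a + 1
--         b = b * (x % 7)
--         x = x // 7
--     return a,b
-- ===== SOURCE B (Python) =====
-- def f(x):
--     # count the base-7 digits as the least a with 7**a > x (x untouched),
--     # then read each digit directly as (x // 7**i) % 7 and multiply them up
--     a = 0
--     while 7 ** a <= x:
--         a += 1
--     b = 1
--     for i in range(a):
--         b = b * ((x // 7 ** i) % 7)
--     return a, b
-- ===== Notes on version B (the rewrite author's own statement) =====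
-- stated objective: alternative
-- what changed: B never mutates x with the div/mod loop: it finds the digit count as the least a with 7**a > x by a power search, then reads each digit independently as (x // 7**i) % 7 and multiplies them in a second loop.
import Mathlib
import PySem

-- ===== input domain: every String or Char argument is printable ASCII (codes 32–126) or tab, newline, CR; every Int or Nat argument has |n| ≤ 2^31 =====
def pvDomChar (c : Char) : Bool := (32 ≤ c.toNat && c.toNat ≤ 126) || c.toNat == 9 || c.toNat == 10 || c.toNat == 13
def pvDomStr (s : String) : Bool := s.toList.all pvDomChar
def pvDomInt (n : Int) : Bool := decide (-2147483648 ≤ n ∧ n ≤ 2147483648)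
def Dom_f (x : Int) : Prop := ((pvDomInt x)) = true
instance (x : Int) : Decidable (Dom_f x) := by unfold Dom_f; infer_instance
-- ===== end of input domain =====

-- B finds the digit count by a power search (x untouched) and reads each base-7
-- digit directly as (x // 7^i) % 7; alternative decomposition, no speed claim.

-- ===== PORT A =====
-- A's while loop: fused accumulators a (count) and b (product), dividing x by 7.
def fLoop (x a b : Int) : Int × Int :=
  if 0 < x then
    fLoop (PySem.Int.floordiv x 7) (a + 1) (b * (PySem.Int.mod x 7))
  else (a, b)
termination_by x.toNat
decreasing_by
  rw [PySem.Int.floordiv_eq_ediv_of_pos (by omega)]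
  omega

def f (x : Int) : Int × Int := fLoop x 0 1

-- ===== PORT B =====
-- B's first loop: increment a while 7 ** a <= x (the counter is a Nat, as the
-- Python counter only ever holds 0,1,2,…).
def fCount (x : Int) (a : Nat) : Nat :=
  if (7 ^ a : Int) ≤ x then fCount x (a + 1) else a
termination_by (x + 1 - 7 ^ a).toNat
decreasing_by
  have h1 : (1 : Int) ≤ 7 ^ a := one_le_pow₀ (by norm_num)
  omega

-- B's second loop: for i in range(a): b = b * ((x // 7 ** i) % 7)
def f_alt (x : Int) : Int × Int :=
  let a := fCount x 0
  let b := (List.range a).foldl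
    (fun b i => b * (PySem.Int.mod (PySem.Int.floordiv x (7 ^ i)) 7)) 1
  ((a : Int), b)

-- ===== PRECONDITION & SPEC =====
def Spec_f (x : Int) (out : Int × Int) : Prop := out = f_alt x
instance (x : Int) (out : Int × Int) : Decidable (Spec_f x out) := by unfold Spec_f; infer_instance

-- ===== CLAIM (what is proved, stated in full; the proofs are below) =====
def Claim_equal_f : Prop := ∀ (x : Int), Dom_f x → Spec_f x (f x)

-- ===== LEMMAS AND PROOFS =====

-- step of the count: counting from k+1 on x equals counting from k on x // 7, plus 1
theorem fCount_step (x : Int) :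
    ∀ k, fCount x (k + 1) = fCount (PySem.Int.floordiv x 7) k + 1 := by
  intro k
  have hbridge : ∀ k : Nat, (7:Int) ^ (k+1) ≤ x ↔ 7 ^ k ≤ PySem.Int.floordiv x 7 := by
    intro k
    rw [PySem.Int.floordiv_eq_ediv_of_pos (by omega : (0:Int) < 7),
        Int.le_ediv_iff_mul_le (by omega : (0:Int) < 7), ← pow_succ]
  induction k using fCount.induct (PySem.Int.floordiv x 7) with
  | case1 k hk ih =>
    conv_lhs => rw [fCount]
    rw [if_pos ((hbridge k).mpr hk), ih]
    conv_rhs => rw [fCount]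
    rw [if_pos hk]
  | case2 k hk =>
    conv_lhs => rw [fCount]
    rw [if_neg (fun h => hk ((hbridge k).mp h))]
    conv_rhs => rw [fCount]
    rw [if_neg hk]

-- digit i+1 of x is digit i of x // 7
theorem digit_shift (x : Int) (i : Nat) :
    PySem.Int.floordiv x (7 ^ (i + 1)) =
      PySem.Int.floordiv (PySem.Int.floordiv x 7) (7 ^ i) := by
  rw [PySem.Int.floordiv_eq_ediv_of_pos (by positivity),
      PySem.Int.floordiv_eq_ediv_of_pos (by omega : (0:Int) < 7),
      PySem.Int.floordiv_eq_ediv_of_pos (by positivity),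
      pow_succ, mul_comm ((7:Int) ^ i) 7,
      Int.ediv_ediv_of_nonneg (by omega : (0:Int) ≤ 7)]

-- the product loop as a list product
theorem prodify (g : Nat → Int) (n : Nat) :
    (List.range n).foldl (fun b i => b * g i) 1 = ((List.range n).map g).prod := by
  rw [List.prod_eq_foldl, List.foldl_map]

-- B's recurrence: f_alt satisfies exactly A's step
theorem f_alt_pos (x : Int) (hx : 0 < x) :
    f_alt x = ((f_alt (PySem.Int.floordiv x 7)).1 + 1,
               (f_alt (PySem.Int.floordiv x 7)).2 * PySem.Int.mod x 7) := by
  have hc : fCount x 0 = fCount (PySem.Int.floordiv x 7) 0 + 1 := by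
    conv_lhs => rw [fCount]
    rw [if_pos (show (7:Int) ^ 0 ≤ x by norm_num; omega)]
    exact fCount_step x 0
  simp only [f_alt, hc]
  refine Prod.ext (by push_cast; ring) ?_
  simp only
  rw [prodify, prodify, List.range_succ_eq_map, List.map_cons, List.prod_cons,
      List.map_map]
  have hd0 : PySem.Int.floordiv x (7 ^ 0) = x := by
    norm_num [PySem.Int.floordiv_eq_ediv_of_pos (by omega : (0:Int) < 1)]
  rw [hd0, mul_comm]
  refine congrArg (· * PySem.Int.mod x 7) (congrArg List.prod (List.map_congr_left ?_))
  intro i _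
  show PySem.Int.mod (PySem.Int.floordiv x (7 ^ (i + 1))) 7 = _
  rw [digit_shift x i]

theorem f_alt_nonpos (x : Int) (hx : ¬ 0 < x) : f_alt x = (0, 1) := by
  have h0 : fCount x 0 = 0 := by
    rw [fCount, if_neg (show ¬ (7:Int) ^ 0 ≤ x by norm_num; omega)]
  simp [f_alt, h0]

theorem fLoop_alt (x a b : Int) :
    fLoop x a b = (a + (f_alt x).1, b * (f_alt x).2) := by
  induction x, a, b using fLoop.induct with
  | case1 x a b hx ih =>
    rw [fLoop, if_pos hx, ih, f_alt_pos x hx]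
    exact Prod.ext (by simp; ring) (by simp; ring)
  | case2 x a b hx =>
    rw [fLoop, if_neg hx, f_alt_nonpos x hx]
    exact Prod.ext (by simp) (by simp)

-- ===== VERDICT (by name: the statement is the Claim_ definition above) =====
theorem f_spec : Claim_equal_f := by
  intro x _
  unfold Spec_f f
  rw [fLoop_alt]
  exact Prod.ext (by simp) (by simp)
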